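-- pv_equiv track=rewrite | github.com/msmassolo/Resumen_de_noticias | main_email.py | parsear_grupos
-- ===== SOURCE A (Python) =====
-- def parsear_grupos(texto):
--     grupos = []
--     grupo_actual = []
--
--     for linea in texto.split("\n"):
--         linea = linea.strip()
--
--         if linea.startswith("GRUPO"):
--             if grupo_actual:
--                 grupos.append(grupo_actual)
--                 grupo_actual = []
--
--         elif linea.startswith("-"):
--             try:
--                 idx = int(linea.replace("-", "").strip())
--                 grupo_actual.append(idx)
--             except:
--                 pass
--
--     if grupo_actual:
--         grupos.append(grupo_actual)
--
--     return grupos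
-- ===== SOURCE B (Python) =====
-- def _parse(linea):
--     if not linea.startswith("-"):
--         return None
--     try:
--         return int(linea.replace("-", "").strip())
--     except ValueError:
--         return None
--
--
-- def parsear_grupos(texto):
--     lineas = [l.strip() for l in texto.split("\n")]
--     # stage 1: cut the line list into segments at GRUPO header lines (headers dropped)
--     tramos = [[]]
--     for linea in lineas:
--         if linea.startswith("GRUPO"):
--             tramos.append([])
--         else:
--             tramos[-1].append(linea)
--     # stage 2: parse each segment, keeping only non-empty groups
--     grupos = []
--     for tramo in tramos:
--         nums = [v for v in map(_parse, tramo) if v is not None]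
--         if nums:
--             grupos.append(nums)
--     return grupos
-- ===== Notes on version B (the rewrite author's own statement) =====
-- stated objective: alternative
-- what changed: A's single pass with a flush-on-header accumulator is replaced by a two-stage decomposition: first split the stripped lines into segments at GRUPO header lines, then parse each segment's dash lines and keep the non-empty groups.
import Mathlib
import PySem

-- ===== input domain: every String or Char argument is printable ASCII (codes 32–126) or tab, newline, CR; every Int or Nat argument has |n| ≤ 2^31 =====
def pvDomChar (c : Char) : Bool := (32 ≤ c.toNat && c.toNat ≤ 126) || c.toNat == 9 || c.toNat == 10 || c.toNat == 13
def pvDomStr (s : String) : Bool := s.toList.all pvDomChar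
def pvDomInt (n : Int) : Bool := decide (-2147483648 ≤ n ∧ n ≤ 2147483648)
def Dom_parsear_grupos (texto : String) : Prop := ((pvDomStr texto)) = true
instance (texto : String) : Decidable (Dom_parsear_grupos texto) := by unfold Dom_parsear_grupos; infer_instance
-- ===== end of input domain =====

-- B replaces A's single-pass flush-on-header accumulator by a two-stage decomposition
-- (split lines into segments at headers, then parse each segment); same cost, alternative structure.

-- ===== PORT A =====
-- int(linea.replace("-", "").strip()) — none = ValueError (caught by A's bare except)
def pvParseA (linea : String) : Option Int :=
  PySem.Int.ofStr? (PySem.Str.strip (PySem.Str.replace linea "-" ""))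

-- one iteration of A's for-loop: state = (grupos, grupo_actual)
def pvStepA (st : List (List Int) × List Int) (linea0 : String) : List (List Int) × List Int :=
  let linea := PySem.Str.strip linea0
  if PySem.Str.startswith linea "GRUPO" then
    if st.2 ≠ [] then (st.1 ++ [st.2], []) else (st.1, [])
  else if PySem.Str.startswith linea "-" then
    match pvParseA linea with
    | some idx => (st.1, st.2 ++ [idx])
    | none => st
  else st

def parsear_grupos (texto : String) : List (List Int) :=
  let st := ((PySem.Str.split? texto "\n").getD []).foldl pvStepA ([], [])
  if st.2 ≠ [] then st.1 ++ [st.2] else st.1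

-- ===== PORT B =====
-- Source B's _parse (line already stripped)
def pvParseB (linea : String) : Option Int :=
  if PySem.Str.startswith linea "-" then
    PySem.Int.ofStr? (PySem.Str.strip (PySem.Str.replace linea "-" ""))
  else none

-- stage 1: tramos as (finished segments, segment under construction)
def pvSegStep (st : List (List String) × List String) (linea : String) :
    List (List String) × List String :=
  if PySem.Str.startswith linea "GRUPO" then (st.1 ++ [st.2], [])
  else (st.1, st.2 ++ [linea])

-- stage 2: one iteration of Source B's second loop
def pvEmitStep (grupos : List (List Int)) (tramo : List String) : List (List Int) :=
  let nums := tramo.filterMap pvParseB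
  if nums ≠ [] then grupos ++ [nums] else grupos

def parsear_grupos_alt (texto : String) : List (List Int) :=
  let lineas := ((PySem.Str.split? texto "\n").getD []).map PySem.Str.strip
  let st := lineas.foldl pvSegStep ([], [])
  (st.1 ++ [st.2]).foldl pvEmitStep []

-- ===== PRECONDITION & SPEC =====
def Spec_parsear_grupos (texto : String) (out : List (List Int)) : Prop := out = parsear_grupos_alt texto
instance (texto : String) (out : List (List Int)) : Decidable (Spec_parsear_grupos texto out) := by unfold Spec_parsear_grupos; infer_instance

-- ===== CLAIM (what is proved, stated in full; the proofs are below) =====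
def Claim_equal_parsear_grupos : Prop := ∀ (texto : String), Dom_parsear_grupos texto → Spec_parsear_grupos texto (parsear_grupos texto)

-- ===== LEMMAS AND PROOFS =====

-- reference emitter both sides are reduced to: the groups contributed by the remaining
-- (already stripped) lines, with `cur` the numbers of the segment under construction
def pvEmit : List Int → List String → List (List Int)
  | cur, [] => if cur = [] then [] else [cur]
  | cur, l :: t =>
    if PySem.Str.startswith l "GRUPO" then
      (if cur = [] then [] else [cur]) ++ pvEmit [] t
    else pvEmit (cur ++ (pvParseB l).toList) t

-- one non-header step of A updates grupo_actual exactly by Source B's per-line parser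
theorem pvStepA_not_header (gs : List (List Int)) (cur : List Int) (l : String)
    (hg : ¬ PySem.Str.startswith (PySem.Str.strip l) "GRUPO" = true) :
    pvStepA (gs, cur) l = (gs, cur ++ (pvParseB (PySem.Str.strip l)).toList) := by
  unfold pvStepA pvParseB
  rw [if_neg hg]
  by_cases hd : PySem.Str.startswith (PySem.Str.strip l) "-"
  · rw [if_pos hd, if_pos hd]
    unfold pvParseA
    cases hE : PySem.Int.ofStr? (PySem.Str.strip (PySem.Str.replace (PySem.Str.strip l) "-" "")) with
    | some v => rfl
    | none => simp
  · rw [if_neg hd, if_neg hd]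
    simp

theorem pvA_emit (ls : List String) (gs : List (List Int)) (cur : List Int) :
    (if (ls.foldl pvStepA (gs, cur)).2 ≠ [] then
       (ls.foldl pvStepA (gs, cur)).1 ++ [(ls.foldl pvStepA (gs, cur)).2]
     else (ls.foldl pvStepA (gs, cur)).1) = gs ++ pvEmit cur (ls.map PySem.Str.strip) := by
  induction ls generalizing gs cur with
  | nil =>
    simp only [List.foldl_nil, List.map_nil, pvEmit]
    by_cases hc : cur = []
    · rw [if_neg (by simp [hc]), if_pos hc, List.append_nil]
    · rw [if_pos hc, if_neg hc]
  | cons l t ih =>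
    rw [List.foldl_cons, List.map_cons]
    by_cases hg : PySem.Str.startswith (PySem.Str.strip l) "GRUPO"
    · by_cases hc : cur = []
      · have hstep : pvStepA (gs, cur) l = (gs, []) := by
          unfold pvStepA
          rw [if_pos hg, if_neg (by simp [hc])]
        rw [hstep, ih]
        simp only [pvEmit, if_pos hg, if_pos hc, List.nil_append]
      · have hstep : pvStepA (gs, cur) l = (gs ++ [cur], []) := by
          unfold pvStepA
          rw [if_pos hg, if_pos hc]
        rw [hstep, ih]
        simp only [pvEmit, if_pos hg, if_neg hc, List.append_assoc, List.singleton_append]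
    · rw [pvStepA_not_header gs cur l hg, ih]
      simp only [pvEmit, if_neg hg]

theorem pvSeg_shift (ls : List String) (d : List (List String)) (c : List String) :
    ls.foldl pvSegStep (d, c)
      = (d ++ (ls.foldl pvSegStep ([], c)).1, (ls.foldl pvSegStep ([], c)).2) := by
  induction ls generalizing d c with
  | nil => simp
  | cons l t ih =>
    by_cases hg : PySem.Str.startswith l "GRUPO"
    · simp only [List.foldl_cons, pvSegStep, if_pos hg, List.nil_append]
      rw [ih (d ++ [c]) [], ih [c] []]
      simp [List.append_assoc]
    · simp only [List.foldl_cons, pvSegStep, if_neg hg, List.nil_append]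
      rw [ih d (c ++ [l])]

theorem pvB_emit (ls : List String) (gs : List (List Int)) (cur : List String) :
    (((ls.foldl pvSegStep ([], cur)).1 ++ [(ls.foldl pvSegStep ([], cur)).2]).foldl
        pvEmitStep gs) = gs ++ pvEmit (cur.filterMap pvParseB) ls := by
  induction ls generalizing gs cur with
  | nil =>
    simp only [List.foldl_nil, List.nil_append, List.foldl_cons, pvEmitStep, pvEmit]
    by_cases h : cur.filterMap pvParseB = []
    · rw [if_neg (by simp [h]), if_pos h, List.append_nil]
    · rw [if_pos h, if_neg h]
  | cons l t ih =>
    by_cases hg : PySem.Str.startswith l "GRUPO"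
    · simp only [List.foldl_cons, pvSegStep, if_pos hg, List.nil_append]
      rw [pvSeg_shift t [cur] []]
      simp only [List.cons_append, List.nil_append, List.foldl_cons]
      have h2 := ih (pvEmitStep gs cur) []
      simp only [List.filterMap_nil] at h2
      rw [h2]
      simp only [pvEmit, if_pos hg, pvEmitStep]
      by_cases h : cur.filterMap pvParseB = []
      · rw [if_neg (by simp [h]), if_pos h, List.nil_append]
      · rw [if_pos h, if_neg h, List.append_assoc, List.singleton_append]
    · simp only [List.foldl_cons, pvSegStep, if_neg hg, List.nil_append]
      rw [ih gs (cur ++ [l])]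
      cases hp : pvParseB l with
      | some v =>
        simp only [pvEmit, if_neg hg, hp, List.filterMap_append, List.filterMap_cons,
          List.filterMap_nil, Option.toList_some]
      | none =>
        simp only [pvEmit, if_neg hg, hp, List.filterMap_append, List.filterMap_cons,
          List.filterMap_nil, Option.toList_none, List.append_nil]

-- ===== VERDICT (by name: the statement is the Claim_ definition above) =====
theorem parsear_grupos_spec : Claim_equal_parsear_grupos := by
  intro texto _
  simp only [Spec_parsear_grupos, parsear_grupos, parsear_grupos_alt]
  rw [pvA_emit, pvB_emit]
  simp only [List.nil_append, List.filterMap_nil]
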